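-- pv_equiv track=rewrite | github.com/Melodiz/CodeRun | Algorithms/Easy/105_square/solution.py | binary_search_max
-- ===== SOURCE A (Python) =====
-- def check(a, b, w, n):
--     return 2*w*(a+b - 2*w) <= n
--
-- def binary_search_max(a, b, n):
--     # find maximum w such that check(a, b, w, n) is true
--     left, right = 0, min(a, b) // 2
--     while left < right:
--         mid = (left + right + 1) // 2
--         if check(a, b, mid, n):
--             left = mid
--         else:
--             right = mid - 1
--     return left
-- ===== SOURCE B (Python) =====
-- def _isqrt(m):
--     # Newton's method floor square root (m >= 0)
--     if m < 2:
--         return m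
--     x = m
--     while True:
--         y = (x + m // x) // 2
--         if y >= x:
--             return x
--         x = y
--
-- def binary_search_max(a, b, n):
--     R = min(a, b) // 2
--     if R <= 0:
--         return 0
--     s = a + b
--     if 2 * R * (s - 2 * R) <= n:
--         return R
--     # largest w with 2*w*(s-2*w) <= n: near the smaller root of 4w^2 - 2sw + n = 0
--     d = _isqrt(s * s - 4 * n)
--     w = (s - d) // 4
--     if w > R:
--         w = R
--     if w < 0:
--         w = 0
--     while w > 0 and not (2 * w * (s - 2 * w) <= n):
--         w -= 1
--     while w + 1 <= R and 2 * (w + 1) * (s - 2 * (w + 1)) <= n: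
--         w += 1
--     return w
-- ===== Notes on version B (the rewrite author's own statement) =====
-- stated objective: alternative
-- what changed: Replaces the binary search over w by a closed-form estimate from the quadratic's root (Newton integer sqrt of s^2-4n), clamped to [0, min(a,b)//2] and corrected by direct predicate checks.
import Mathlib
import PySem

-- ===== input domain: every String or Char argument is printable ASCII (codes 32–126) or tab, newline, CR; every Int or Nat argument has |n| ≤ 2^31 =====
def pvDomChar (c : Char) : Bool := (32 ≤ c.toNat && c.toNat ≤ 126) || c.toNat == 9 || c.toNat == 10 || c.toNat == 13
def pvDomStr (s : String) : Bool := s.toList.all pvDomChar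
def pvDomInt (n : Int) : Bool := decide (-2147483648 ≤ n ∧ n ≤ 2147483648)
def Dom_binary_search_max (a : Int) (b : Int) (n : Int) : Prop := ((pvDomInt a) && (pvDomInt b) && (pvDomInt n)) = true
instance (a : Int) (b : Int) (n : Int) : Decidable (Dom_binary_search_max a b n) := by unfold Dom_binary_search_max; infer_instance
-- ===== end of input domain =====

-- B replaces A's binary search by a closed-form quadratic-root estimate (hand-rolled
-- Newton integer sqrt) clamped to [0, min(a,b)//2] and corrected by direct checks;
-- objective: alternative (similar measured speed, different algorithm).

-- ===== PORT A =====
def pvCheck (a : Int) (b : Int) (w : Int) (n : Int) : Bool :=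
  decide (2*w*(a+b - 2*w) ≤ n)

def pvBsLoop (a : Int) (b : Int) (n : Int) (left : Int) (right : Int) : Int :=
  if h : left < right then
    -- mid = (left + right + 1) // 2
    if pvCheck a b (PySem.Int.floordiv (left + right + 1) 2) n then
      pvBsLoop a b n (PySem.Int.floordiv (left + right + 1) 2) right
    else pvBsLoop a b n left (PySem.Int.floordiv (left + right + 1) 2 - 1)
  else left
termination_by (right - left).toNat
decreasing_by
  · have := (PySem.Int.floordiv_two_mid_bounds (lo := left + 1) (hi := right) (by omega)).1
    have h2 : left + 1 + right = left + right + 1 := by ring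
    rw [h2] at this; omega
  · have := (PySem.Int.floordiv_two_mid_bounds (lo := left + 1) (hi := right) (by omega)).2
    have h2 : left + 1 + right = left + right + 1 := by ring
    rw [h2] at this; omega

def binary_search_max (a : Int) (b : Int) (n : Int) : Int :=
  pvBsLoop a b n 0 (PySem.Int.floordiv (min a b) 2)

-- ===== PORT B =====
-- Newton iteration 'while True: y = (x + m//x)//2; if y >= x: return x; x = y',
-- with fuel only to make the same computation total (ample: x strictly decreases).
def pvNwt (fuel : Nat) (m : Int) (x : Int) : Int :=
  match fuel with
  | 0 => x
  | fuel + 1 =>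
    let y := PySem.Int.floordiv (x + PySem.Int.floordiv m x) 2
    if y ≥ x then x else pvNwt fuel m y

def pvIsqrt (m : Int) : Int :=
  if m < 2 then m else pvNwt (m.toNat + 2) m m

def pvAdjDown (s : Int) (n : Int) (w : Int) : Int :=
  if h : w > 0 ∧ ¬(2*w*(s - 2*w) ≤ n) then pvAdjDown s n (w - 1) else w
termination_by w.toNat
decreasing_by omega

def pvAdjUp (s : Int) (n : Int) (R : Int) (w : Int) : Int :=
  if h : w + 1 ≤ R ∧ 2*(w+1)*(s - 2*(w+1)) ≤ n then pvAdjUp s n R (w + 1) else w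
termination_by (R - w).toNat
decreasing_by omega

def binary_search_max_alt (a : Int) (b : Int) (n : Int) : Int :=
  let R := PySem.Int.floordiv (min a b) 2
  if R ≤ 0 then 0
  else
    let s := a + b
    if 2*R*(s - 2*R) ≤ n then R
    else
      let d := pvIsqrt (s*s - 4*n)
      let w0 := PySem.Int.floordiv (s - d) 4
      let w1 := if w0 > R then R else w0
      let w2 := if w1 < 0 then 0 else w1
      pvAdjUp s n R (pvAdjDown s n w2)

-- ===== PRECONDITION & SPEC =====
def Spec_binary_search_max (a : Int) (b : Int) (n : Int) (out : Int) : Prop := out = binary_search_max_alt a b n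
instance (a : Int) (b : Int) (n : Int) (out : Int) : Decidable (Spec_binary_search_max a b n out) := by unfold Spec_binary_search_max; infer_instance

-- ===== CLAIM (what is proved, stated in full; the proofs are below) =====
def Claim_equal_binary_search_max : Prop := ∀ (a : Int) (b : Int) (n : Int), Dom_binary_search_max a b n → Spec_binary_search_max a b n (binary_search_max a b n)

-- ===== LEMMAS AND PROOFS =====

-- The predicate both programs decide, and the characterisation of the answer.
def pvP (s n w : Int) : Prop := 2*w*(s - 2*w) ≤ n

def pvChar (s n R r : Int) : Prop :=
  0 ≤ r ∧ r ≤ R ∧ (r = 0 ∨ pvP s n r) ∧ (r = R ∨ ¬ pvP s n (r + 1))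

-- Monotonicity: on [0, R] with s ≥ 4R the map w ↦ 2w(s-2w) is nondecreasing,
-- so pvP is downward closed there.
lemma pvP_mono (s n R v w : Int) (hs : 4*R ≤ s) (h0 : 0 ≤ v) (hvw : v ≤ w) (hwR : w ≤ R)
    (hw : pvP s n w) : pvP s n v := by
  unfold pvP at *
  nlinarith [mul_nonneg (sub_nonneg.mpr hvw) (by nlinarith : (0:Int) ≤ s - 2*w - 2*v)]

lemma pvChar_unique_aux (s n R r1 r2 : Int) (hs : 4*R ≤ s)
    (h1 : pvChar s n R r1) (h2 : pvChar s n R r2) (hlt : r1 < r2) : False := by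
  obtain ⟨h10, h1R, _, h1r⟩ := h1
  obtain ⟨h20, h2R, h2p, _⟩ := h2
  have hp2 : pvP s n r2 := h2p.resolve_left (by omega)
  have hnp : ¬ pvP s n (r1 + 1) := h1r.resolve_left (by omega)
  exact hnp (pvP_mono s n R (r1+1) r2 hs (by omega) (by omega) h2R hp2)

lemma pvChar_unique (s n R r1 r2 : Int) (hs : 4*R ≤ s)
    (h1 : pvChar s n R r1) (h2 : pvChar s n R r2) : r1 = r2 := by
  rcases lt_trichotomy r1 r2 with h | h | h
  · exact absurd (pvChar_unique_aux s n R r1 r2 hs h1 h2 h) (fun x => x)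
  · exact h
  · exact absurd (pvChar_unique_aux s n R r2 r1 hs h2 h1 h) (fun x => x)

-- A's loop maintains the invariant and delivers the characterised value.
lemma pvBsLoop_char (a b n : Int) (R : Int) :
    ∀ (left right : Int), 0 ≤ left → left ≤ right → right ≤ R →
    (left = 0 ∨ pvP (a+b) n left) → (right = R ∨ ¬ pvP (a+b) n (right + 1)) →
    pvChar (a+b) n R (pvBsLoop a b n left right) := by
  intro left right
  induction left, right using pvBsLoop.induct a b n with
  | case1 left right h hc ih =>
    intro h0 hlr hrR hl hr
    set mid := PySem.Int.floordiv (left + right + 1) 2 with hmiddef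
    have hmid1 : left + 1 ≤ mid := by
      have := (PySem.Int.floordiv_two_mid_bounds (lo := left + 1) (hi := right) (by omega)).1
      have h2 : left + 1 + right = left + right + 1 := by ring
      rw [h2] at this; omega
    have hmid2 : mid ≤ right := by
      have := (PySem.Int.floordiv_two_mid_bounds (lo := left + 1) (hi := right) (by omega)).2
      have h2 : left + 1 + right = left + right + 1 := by ring
      rw [h2] at this; omega
    rw [pvBsLoop, dif_pos h, if_pos hc]
    exact ih (by omega) (by omega) hrR (Or.inr (by simpa [pvCheck, pvP] using hc)) hr
  | case2 left right h hc ih =>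
    intro h0 hlr hrR hl hr
    set mid := PySem.Int.floordiv (left + right + 1) 2 with hmiddef
    have hmid1 : left + 1 ≤ mid := by
      have := (PySem.Int.floordiv_two_mid_bounds (lo := left + 1) (hi := right) (by omega)).1
      have h2 : left + 1 + right = left + right + 1 := by ring
      rw [h2] at this; omega
    have hmid2 : mid ≤ right := by
      have := (PySem.Int.floordiv_two_mid_bounds (lo := left + 1) (hi := right) (by omega)).2
      have h2 : left + 1 + right = left + right + 1 := by ring
      rw [h2] at this; omega
    rw [pvBsLoop, dif_pos h, if_neg hc]
    refine ih h0 (by omega) (by omega) hl (Or.inr ?_)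
    have : ¬ (2*mid*(a+b - 2*mid) ≤ n) := by simpa [pvCheck] using hc
    simpa [pvP, show mid - 1 + 1 = mid by ring] using this
  | case3 left right h =>
    intro h0 hlr hrR hl hr
    have hE : left = right := by omega
    rw [pvBsLoop, dif_neg h]
    exact ⟨h0, by omega, hl, by rw [hE]; exact hr⟩

-- B's correction loops deliver the characterised value from any start in [0, R].
lemma pvAdjDown_spec (s n : Int) : ∀ (w : Int), 0 ≤ w →
    0 ≤ pvAdjDown s n w ∧ pvAdjDown s n w ≤ w ∧
      (pvAdjDown s n w = 0 ∨ pvP s n (pvAdjDown s n w)) := by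
  intro w
  induction w using pvAdjDown.induct s n with
  | case1 w h ih =>
    intro h0
    rw [pvAdjDown, dif_pos h]
    obtain ⟨a1, a2, a3⟩ := ih (by omega)
    exact ⟨a1, by omega, a3⟩
  | case2 w h =>
    intro h0
    rw [pvAdjDown, dif_neg h]
    refine ⟨h0, le_refl _, ?_⟩
    by_cases hw : w = 0
    · exact Or.inl hw
    · rw [Decidable.not_and_iff_or_not] at h
      have hnp := h.resolve_left (by omega)
      exact Or.inr (by simpa [pvP] using not_not.mp hnp)

lemma pvAdjUp_spec (s n R : Int) : ∀ (w : Int), 0 ≤ w → w ≤ R →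
    (w = 0 ∨ pvP s n w) → pvChar s n R (pvAdjUp s n R w) := by
  intro w
  induction w using pvAdjUp.induct s n R with
  | case1 w h ih =>
    intro h0 hR hw
    rw [pvAdjUp, dif_pos h]
    exact ih (by omega) h.1 (Or.inr (by simpa [pvP] using h.2))
  | case2 w h =>
    intro h0 hR hw
    rw [pvAdjUp, dif_neg h]
    rw [Decidable.not_and_iff_or_not] at h
    refine ⟨h0, hR, hw, ?_⟩
    by_cases hwR : w = R
    · exact Or.inl hwR
    · exact Or.inr (by simpa [pvP] using h.resolve_left (by omega))

-- s ≥ 4R for R = (min a b) // 2.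
lemma pvR_bound (a b : Int) : 4 * PySem.Int.floordiv (min a b) 2 ≤ a + b := by
  have h := PySem.Int.floordiv_mul_add_mod (min a b) 2
  have hm : 0 ≤ PySem.Int.mod (min a b) 2 := by
    have := PySem.Int.mod_two_eq (min a b)
    rcases this with h1 | h1 <;> omega
  have h1 : min a b ≤ a := min_le_left a b
  have h2 : min a b ≤ b := min_le_right a b
  omega

-- ===== VERDICT (by name: the statement is the Claim_ definition above) =====
theorem binary_search_max_spec : Claim_equal_binary_search_max := by
  intro a b n _
  unfold Spec_binary_search_max binary_search_max binary_search_max_alt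
  set R := PySem.Int.floordiv (min a b) 2 with hRdef
  have hs : 4 * R ≤ a + b := pvR_bound a b
  by_cases hR : R ≤ 0
  · simp only [hR, if_pos]
    rw [pvBsLoop, dif_neg (show ¬ ((0:Int) < R) by omega)]
  · simp only [hR]
    have hA : pvChar (a+b) n R (pvBsLoop a b n 0 R) :=
      pvBsLoop_char a b n R 0 R (le_refl 0) (by omega) (le_refl R)
        (Or.inl rfl) (Or.inl rfl)
    by_cases hPR : 2*R*(a + b - 2*R) ≤ n
    · simp only [hPR, if_pos]
      refine pvChar_unique (a+b) n R _ R hs hA ⟨by omega, le_refl R, Or.inr hPR, Or.inl rfl⟩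
    · simp only [hPR]
      set w2 := (if (if PySem.Int.floordiv (a + b - pvIsqrt ((a+b)*(a+b) - 4*n)) 4 > R then R
                    else PySem.Int.floordiv (a + b - pvIsqrt ((a+b)*(a+b) - 4*n)) 4) < 0 then 0
                 else (if PySem.Int.floordiv (a + b - pvIsqrt ((a+b)*(a+b) - 4*n)) 4 > R then R
                    else PySem.Int.floordiv (a + b - pvIsqrt ((a+b)*(a+b) - 4*n)) 4)) with hw2
    -- w2 ∈ [0, R]
      have hw2b : 0 ≤ w2 ∧ w2 ≤ R := by
        rw [hw2]; split_ifs <;> omega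
      obtain ⟨d1, d2, d3⟩ := pvAdjDown_spec (a+b) n w2 hw2b.1
      have hB : pvChar (a+b) n R (pvAdjUp (a+b) n R (pvAdjDown (a+b) n w2)) :=
        pvAdjUp_spec (a+b) n R _ d1 (by omega) d3
      exact pvChar_unique (a+b) n R _ _ hs hA hB
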